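-- pv_equiv track=rewrite | github.com/gangheivt/dev_script | rx_total_parse.py | parse_channel_quality
-- ===== SOURCE A (Python) =====
-- def parse_channel_quality(byte_array):
--     """
--     Parses a byte array where each byte represents 4 channels (LSB-first).
--     Each channel is 2 bits:
--     - 00 (0) = unknown
--     - 01 (1) = good
--     - 11 (3) = bad
--     """
--     result = []
--     for byte in byte_array:
--         # Extract 4 channels from the byte (2 bits each), LSB-first
--         for i in range(4):
--             # Shift to isolate each 2-bit channel (LSB to MSB)
--             channel_bits = (byte >> (i * 2)) & 0b11
--             result.append(channel_bits)
--
--     groups = {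
--     "good": [],    # 1 对应 "good"
--     "bad": [],     # 3 对应 "bad"
--     "unknown": []  # 0 对应 "unknown"
--     }
--
--     # 遍历数组，按状态分组并记录索引（注意：索引从 0 开始）
--     for index, quality in enumerate(result):
--         if quality == 1:
--             groups["good"].append(2*index)
--             groups["good"].append(2*index+1)
--         elif quality == 3:
--             groups["bad"].append(2*index)
--             groups["bad"].append(2*index+1)
--         elif quality == 0:
--             groups["unknown"].append(2*index)
--             groups["unknown"].append(2*index+1)
--
--     return groups["good"], groups["bad"], groups ["unknown"]
-- ===== SOURCE B (Python) =====
-- def parse_channel_quality(byte_array):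
--     """
--     Parses a byte array where each byte represents 4 channels (LSB-first).
--     Each channel is 2 bits: 00 unknown, 01 good, 11 bad.
--     Returns (good, bad, unknown) lists of doubled channel indices.
--     """
--     def idx(v):
--         return [j
--                 for b, byte in enumerate(byte_array)
--                 for i in range(4)
--                 if (byte >> (2 * i)) & 0b11 == v
--                 for j in (8 * b + 2 * i, 8 * b + 2 * i + 1)]
--     return idx(1), idx(3), idx(0)
-- ===== Notes on version B (the rewrite author's own statement) =====
-- stated objective: simpler
-- what changed: Replaced A's two sequential passes (build an intermediate per-channel list, then group it through a string-keyed dict of buckets) by three direct filtered comprehensions over the bytes, one per status, computing the doubled global index 8*b+2*i arithmetically with no intermediate list and no dict.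
import Mathlib
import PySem

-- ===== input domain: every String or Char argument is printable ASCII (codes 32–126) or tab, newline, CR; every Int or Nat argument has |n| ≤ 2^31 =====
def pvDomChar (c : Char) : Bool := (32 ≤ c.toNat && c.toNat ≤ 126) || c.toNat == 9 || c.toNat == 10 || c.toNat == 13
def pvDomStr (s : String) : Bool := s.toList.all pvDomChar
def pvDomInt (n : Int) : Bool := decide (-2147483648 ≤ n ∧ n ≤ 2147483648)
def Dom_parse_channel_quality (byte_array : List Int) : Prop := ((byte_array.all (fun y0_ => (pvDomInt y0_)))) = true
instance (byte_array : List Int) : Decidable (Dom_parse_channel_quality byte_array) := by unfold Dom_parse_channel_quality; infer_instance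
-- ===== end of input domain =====

-- B replaces A's two passes (intermediate channel list + dict grouping) by three
-- direct filtered comprehensions, one per status; same return value, simpler shape.

-- ===== PORT A =====
def parse_channel_quality (byte_array : List Int) : List Int × List Int × List Int :=
  -- first loop: result.append((byte >> (i*2)) & 0b11) for each byte, i in range(4)
  let result : List Int := byte_array.foldl (fun result byte =>
    (PySem.List.pyRange 0 4 1).foldl (fun result i =>
      result ++ [PySem.Int.band (byte >>> (i * 2).toNat) 3]) result) []
  -- second loop: group doubled indices by quality (dict with keys "good"/"bad"/"unknown")
  let groups : List Int × List Int × List Int :=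
    (PySem.List.enumerate result 0).foldl (fun g iq =>
      if iq.2 = 1 then (g.1 ++ [2 * iq.1, 2 * iq.1 + 1], g.2.1, g.2.2)
      else if iq.2 = 3 then (g.1, g.2.1 ++ [2 * iq.1, 2 * iq.1 + 1], g.2.2)
      else if iq.2 = 0 then (g.1, g.2.1, g.2.2 ++ [2 * iq.1, 2 * iq.1 + 1])
      else g) ([], [], [])
  groups

-- ===== PORT B =====
-- idx(v): one filtered comprehension over (b, byte) and i in range(4)
def pcqIdx (byte_array : List Int) (v : Int) : List Int :=
  (PySem.List.enumerate byte_array 0).flatMap (fun bb =>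
    (PySem.List.pyRange 0 4 1).flatMap (fun i =>
      if PySem.Int.band (bb.2 >>> (2 * i).toNat) 3 = v
      then [8 * bb.1 + 2 * i, 8 * bb.1 + 2 * i + 1] else []))

def parse_channel_quality_alt (byte_array : List Int) : List Int × List Int × List Int :=
  (pcqIdx byte_array 1, pcqIdx byte_array 3, pcqIdx byte_array 0)

-- ===== PRECONDITION & SPEC =====
def Spec_parse_channel_quality (byte_array : List Int) (out : List Int × List Int × List Int) : Prop := out = parse_channel_quality_alt byte_array
instance (byte_array : List Int) (out : List Int × List Int × List Int) : Decidable (Spec_parse_channel_quality byte_array out) := by unfold Spec_parse_channel_quality; infer_instance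

-- ===== CLAIM (what is proved, stated in full; the proofs are below) =====
def Claim_equal_parse_channel_quality : Prop := ∀ (byte_array : List Int), Dom_parse_channel_quality byte_array → Spec_parse_channel_quality byte_array (parse_channel_quality byte_array)

-- ===== LEMMAS AND PROOFS =====

-- A's four channels of one byte
def pcqChs (byte : Int) : List Int :=
  (PySem.List.pyRange 0 4 1).map (fun i => PySem.Int.band (byte >>> (i * 2).toNat) 3)

-- selection of doubled indices of value v from an enumerated quality list
def pcqSel (v : Int) (l : List (Int × Int)) : List Int :=
  l.flatMap (fun iq => if iq.2 = v then [2 * iq.1, 2 * iq.1 + 1] else [])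

lemma pcqSel_append (v : Int) (l1 l2 : List (Int × Int)) :
    pcqSel v (l1 ++ l2) = pcqSel v l1 ++ pcqSel v l2 := by
  simp [pcqSel]

lemma pcqSel_cons (v : Int) (iq : Int × Int) (t : List (Int × Int)) :
    pcqSel v (iq :: t)
    = (if iq.2 = v then [2 * iq.1, 2 * iq.1 + 1] else []) ++ pcqSel v t := by
  simp [pcqSel]

-- A's first loop builds the flatMap of per-byte channel lists
lemma pcq_result_eq (byte_array : List Int) (acc : List Int) :
    byte_array.foldl (fun result byte =>
      (PySem.List.pyRange 0 4 1).foldl (fun result i =>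
        result ++ [PySem.Int.band (byte >>> (i * 2).toNat) 3]) result) acc
    = acc ++ byte_array.flatMap pcqChs := by
  induction byte_array generalizing acc with
  | nil => simp
  | cons b t ih =>
    simp only [List.foldl_cons, List.flatMap_cons, ih]
    have h4 : PySem.List.pyRange 0 4 1 = [0, 1, 2, 3] := by decide
    simp only [h4, pcqChs, List.foldl_cons, List.foldl_nil, List.map_cons, List.map_nil]
    norm_num [List.append_assoc, Int.shiftRight_natCast_right]
    refine ⟨?_, ?_, ?_, ?_⟩
    · rw [show (0:Int) = ((0:Nat):Int) by norm_num, Int.shiftRight_natCast_right]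
      simp
    · rw [show (2:Int) = ((2:Nat):Int) by norm_num, Int.shiftRight_natCast_right]; simp
    · rw [show (4:Int) = ((4:Nat):Int) by norm_num, Int.shiftRight_natCast_right]; simp
    · rw [show (6:Int) = ((6:Nat):Int) by norm_num, Int.shiftRight_natCast_right]; simp

-- A's second loop is componentwise selection of qualities 1, 3, 0
lemma pcq_group_eq (l : List (Int × Int)) (g b u : List Int) :
    l.foldl (fun g iq =>
      if iq.2 = 1 then (g.1 ++ [2 * iq.1, 2 * iq.1 + 1], g.2.1, g.2.2)
      else if iq.2 = 3 then (g.1, g.2.1 ++ [2 * iq.1, 2 * iq.1 + 1], g.2.2)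
      else if iq.2 = 0 then (g.1, g.2.1, g.2.2 ++ [2 * iq.1, 2 * iq.1 + 1])
      else g) (g, b, u)
    = (g ++ pcqSel 1 l, b ++ pcqSel 3 l, u ++ pcqSel 0 l) := by
  induction l generalizing g b u with
  | nil => simp [pcqSel]
  | cons iq t ih =>
    simp only [List.foldl_cons]
    split_ifs with h1 h3 h0 <;>
      simp [pcqSel_cons, *, List.append_assoc]

-- one byte: selecting from its enumerated channels is B's inner comprehension
lemma pcq_block (v : Int) (bb : Int × Int) :
    pcqSel v (PySem.List.enumerate (pcqChs bb.2) (4 * bb.1))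
    = (PySem.List.pyRange 0 4 1).flatMap (fun i =>
        if PySem.Int.band (bb.2 >>> (2 * i).toNat) 3 = v
        then [8 * bb.1 + 2 * i, 8 * bb.1 + 2 * i + 1] else []) := by
  obtain ⟨s, b⟩ := bb
  dsimp only
  have h4 : PySem.List.pyRange 0 4 1 = [0, 1, 2, 3] := by decide
  simp only [pcqChs, h4, List.map_cons, List.map_nil, PySem.List.enumerate_cons,
    PySem.List.enumerate_nil, pcqSel, List.flatMap_cons, List.flatMap_nil, List.append_nil]
  norm_num
  split_ifs <;> simp <;> (try ring_nf) <;> (try simp)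

lemma pcq_len_chs (b : Int) : (pcqChs b).length = 4 := by
  simp [pcqChs, PySem.List.length_pyRange_one]

-- selecting from the enumeration of the flattened channel list is B's comprehension
lemma pcq_sel_enum (v : Int) (byte_array : List Int) (s : Int) :
    pcqSel v (PySem.List.enumerate (byte_array.flatMap pcqChs) (4 * s))
    = (PySem.List.enumerate byte_array s).flatMap (fun bb =>
        (PySem.List.pyRange 0 4 1).flatMap (fun i =>
          if PySem.Int.band (bb.2 >>> (2 * i).toNat) 3 = v
          then [8 * bb.1 + 2 * i, 8 * bb.1 + 2 * i + 1] else [])) := by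
  induction byte_array generalizing s with
  | nil => simp [pcqSel, PySem.List.enumerate]
  | cons b t ih =>
    rw [List.flatMap_cons, PySem.List.enumerate_append, pcqSel_append,
        PySem.List.enumerate_cons, pcq_len_chs]
    have h4s : (4 * s + (4 : Nat) : Int) = 4 * (s + 1) := by push_cast; ring
    have hb := pcq_block v (s, b)
    dsimp only at hb
    rw [h4s, ih, hb, List.flatMap_cons]
    simp only [Int.shiftRight_natCast_right]

-- ===== VERDICT (by name: the statement is the Claim_ definition above) =====
theorem parse_channel_quality_spec : Claim_equal_parse_channel_quality := by
  intro byte_array _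
  show _ = _
  unfold parse_channel_quality parse_channel_quality_alt
  dsimp only
  rw [pcq_result_eq, List.nil_append, pcq_group_eq]
  have h := fun v => pcq_sel_enum v byte_array 0
  simp only [mul_zero] at h
  simp [h 1, h 3, h 0, pcqIdx]
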